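-- pv_equiv track=rewrite | github.com/Hirin/2A202600155-NguyenDuyMinhHoang-Day07 | Lecture-Day-08-09-10/day08/lab/rag_answer.py | _find_chunk_index
-- ===== SOURCE A (Python) =====
-- from typing import Any, Dict, List, Optional
--
-- def _find_chunk_index(chunks: List[Dict[str, Any]], needles: List[str]) -> int:
--     lowered_needles = [needle.lower() for needle in needles if needle]
--     for index, chunk in enumerate(chunks, start=1):
--         text = chunk["text"].lower()
--         if all(needle in text for needle in lowered_needles):
--             return index
--     for index, chunk in enumerate(chunks, start=1):
--         text = chunk["text"].lower()
--         if any(needle in text for needle in lowered_needles):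
--             return index
--     return 1
-- ===== SOURCE B (Python) =====
-- from typing import Any, Dict, List
--
-- def _find_chunk_index(chunks: List[Dict[str, Any]], needles: List[str]) -> int:
--     lowered_needles = [needle.lower() for needle in needles if needle]
--     fallback = None
--     for index, chunk in enumerate(chunks, start=1):
--         text = chunk["text"].lower()
--         if all(needle in text for needle in lowered_needles):
--             return index
--         if fallback is None and any(needle in text for needle in lowered_needles):
--             fallback = index
--     return fallback if fallback is not None else 1
-- ===== Notes on version B (the rewrite author's own statement) =====
-- stated objective: simpler
-- what changed: Replaces A's two sequential scans (first for an all-needles match, then a whole second scan for an any-needle match) with one pass that returns on an all-match and records the first any-match in a fallback variable.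
-- outside the precondition, e.g. on _find_chunk_index([{'text': 'a'}, {}], ['a']): A returns 1, B returns 1
import Mathlib
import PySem

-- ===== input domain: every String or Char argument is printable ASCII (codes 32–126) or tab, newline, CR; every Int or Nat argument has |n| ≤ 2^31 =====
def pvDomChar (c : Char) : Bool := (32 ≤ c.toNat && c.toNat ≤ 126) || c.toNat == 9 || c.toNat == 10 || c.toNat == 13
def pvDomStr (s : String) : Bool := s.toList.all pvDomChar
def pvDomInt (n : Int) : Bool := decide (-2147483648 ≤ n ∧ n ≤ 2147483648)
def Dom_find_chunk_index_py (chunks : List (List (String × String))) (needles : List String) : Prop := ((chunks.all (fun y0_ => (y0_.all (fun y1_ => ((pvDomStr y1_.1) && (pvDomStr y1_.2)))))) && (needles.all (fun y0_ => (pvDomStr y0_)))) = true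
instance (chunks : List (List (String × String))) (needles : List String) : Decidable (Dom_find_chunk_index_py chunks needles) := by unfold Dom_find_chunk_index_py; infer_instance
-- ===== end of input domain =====

-- B replaces A's two sequential scans with a single pass that returns on an
-- all-needles match and records the first any-needle match as a fallback
-- (objective: simpler).

-- ===== PORT A =====
-- first pass: first index (1-based) whose text contains ALL lowered needles.
-- chunk["text"] missing = KeyError; excluded by Pre_: the port returns the junk marker `some 0` there.
def pvAPass1 (lowered : List String) : List (List (String × String)) → Int → Option Int
  | [], _ => none
  | c :: rest, i =>
    match PySem.Dict.get? ⟨c⟩ "text" with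
    | none => some 0
    | some t =>
      let text := PySem.Str.lower t
      if lowered.all (fun n => PySem.Str.isIn n text) then some i
      else pvAPass1 lowered rest (i + 1)

-- second pass: first index whose text contains ANY lowered needle (junk `some 0` on KeyError).
def pvAPass2 (lowered : List String) : List (List (String × String)) → Int → Option Int
  | [], _ => none
  | c :: rest, i =>
    match PySem.Dict.get? ⟨c⟩ "text" with
    | none => some 0
    | some t =>
      let text := PySem.Str.lower t
      if lowered.any (fun n => PySem.Str.isIn n text) then some i
      else pvAPass2 lowered rest (i + 1)

def find_chunk_index_py (chunks : List (List (String × String))) (needles : List String) : Int :=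
  let lowered := (needles.filter (fun n => n ≠ "")).map PySem.Str.lower
  match pvAPass1 lowered chunks 1 with
  | some j => j
  | none =>
    match pvAPass2 lowered chunks 1 with
    | some j => j
    | none => 1

-- ===== PORT B =====
-- single pass with a fallback accumulator (Source B); `getD … ""` totalises the
-- chunk["text"] KeyError, which Pre_ excludes.
def pvBLoop (lowered : List String) : List (List (String × String)) → Int → Option Int → Int
  | [], _, fallback => fallback.getD 1
  | c :: rest, i, fallback =>
    let text := PySem.Str.lower (PySem.Dict.getD ⟨c⟩ "text" "")
    if lowered.all (fun n => PySem.Str.isIn n text) then i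
    else
      let fallback' :=
        if fallback.isNone && lowered.any (fun n => PySem.Str.isIn n text) then some i
        else fallback
      pvBLoop lowered rest (i + 1) fallback'

def find_chunk_index_py_alt (chunks : List (List (String × String))) (needles : List String) : Int :=
  let lowered := (needles.filter (fun n => n ≠ "")).map PySem.Str.lower
  pvBLoop lowered chunks 1 none

-- ===== PRECONDITION & SPEC =====
-- Pre_ excludes inputs where some chunk lacks a "text" key: there A raises
-- KeyError (except when an earlier all-match chunk returns first, in which
-- case A still returns; those inputs are excluded too, see claim cites).
def Pre_find_chunk_index_py (chunks : List (List (String × String))) (needles : List String) : Prop :=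
  ∀ c ∈ chunks, (PySem.Dict.get? ⟨c⟩ "text").isSome
instance (chunks : List (List (String × String))) (needles : List String) : Decidable (Pre_find_chunk_index_py chunks needles) := by unfold Pre_find_chunk_index_py; infer_instance

def pvWitness_find_chunk_index_py : (List (List (String × String))) × List String :=
  ([[("text", "Hello world")], [("text", "abc")]], ["world", "b"])

def Spec_find_chunk_index_py (chunks : List (List (String × String))) (needles : List String) (out : Int) : Prop := out = find_chunk_index_py_alt chunks needles
instance (chunks : List (List (String × String))) (needles : List String) (out : Int) : Decidable (Spec_find_chunk_index_py chunks needles out) := by unfold Spec_find_chunk_index_py; infer_instance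

-- ===== CLAIM (what is proved, stated in full; the proofs are below) =====
def Claim_equal_find_chunk_index_py : Prop := ∀ (chunks : List (List (String × String))) (needles : List String), Dom_find_chunk_index_py chunks needles → Pre_find_chunk_index_py chunks needles → Spec_find_chunk_index_py chunks needles (find_chunk_index_py chunks needles)

-- ===== LEMMAS AND PROOFS =====

-- B's single pass equals: A's first-pass result if any, else the recorded
-- fallback merged (first-wins) with A's second-pass result, defaulting to 1.
theorem pvBLoop_eq (lowered : List String) (chunks : List (List (String × String)))
    (i : Int) (fallback : Option Int)
    (h : ∀ c ∈ chunks, (PySem.Dict.get? ⟨c⟩ "text").isSome) :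
    pvBLoop lowered chunks i fallback =
      match pvAPass1 lowered chunks i with
      | some j => j
      | none => (fallback.or (pvAPass2 lowered chunks i)).getD 1 := by
  induction chunks generalizing i fallback with
  | nil => simp [pvBLoop, pvAPass1, pvAPass2]
  | cons c rest ih =>
    have hc : (PySem.Dict.get? (⟨c⟩ : PySem.Dict String String) "text").isSome := h c (by simp)
    obtain ⟨t, ht⟩ := Option.isSome_iff_exists.mp hc
    have hrest : ∀ c' ∈ rest, (PySem.Dict.get? (⟨c'⟩ : PySem.Dict String String) "text").isSome :=
      fun c' hm => h c' (List.mem_cons_of_mem _ hm)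
    simp only [pvBLoop, pvAPass1, pvAPass2, PySem.Dict.getD, ht, Option.getD_some]
    by_cases hall : (lowered.all fun n => PySem.Str.isIn n (PySem.Str.lower t)) = true
    · rw [if_pos hall, if_pos hall]
    · rw [if_neg hall, if_neg hall, ih _ _ hrest]
      cases fallback with
      | some b => simp
      | none =>
        by_cases hany : (lowered.any fun n => PySem.Str.isIn n (PySem.Str.lower t)) = true
        · simp only [Option.isNone_none, Bool.true_and]
          rw [if_pos hany, if_pos hany]
          cases pvAPass1 lowered rest (i + 1) <;> simp
        · simp only [Option.isNone_none, Bool.true_and]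
          rw [if_neg hany, if_neg hany]

-- ===== VERDICT (by name: the statement is the Claim_ definition above) =====
theorem find_chunk_index_py_spec : Claim_equal_find_chunk_index_py := by
  intro chunks needles _ hpre
  show (match pvAPass1 ((needles.filter (fun n => n ≠ "")).map PySem.Str.lower) chunks 1 with
        | some j => j
        | none =>
          match pvAPass2 ((needles.filter (fun n => n ≠ "")).map PySem.Str.lower) chunks 1 with
          | some j => j
          | none => 1) =
      pvBLoop ((needles.filter (fun n => n ≠ "")).map PySem.Str.lower) chunks 1 none
  rw [pvBLoop_eq _ _ _ _ hpre]
  cases pvAPass1 ((needles.filter (fun n => n ≠ "")).map PySem.Str.lower) chunks 1 with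
  | some j => rfl
  | none =>
    cases pvAPass2 ((needles.filter (fun n => n ≠ "")).map PySem.Str.lower) chunks 1 with
    | some j => rfl
    | none => rfl
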